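-- pv_equiv track=rewrite | github.com/ozgung/aoc | aoc2023/day14_2.py | move_rocks_for_line
-- ===== SOURCE A (Python) =====
-- def move_rocks_for_line(arr):
--     for i in range(len(arr)):
--         if arr[i] == '.':
--             for j in range(i+1, len(arr)):
--                 if arr[j] == 'O':
--                     arr[j], arr[i] = arr[i], arr[j]
--                     break
--                 elif arr[j] == '#':
--                     break
--                 else:
--                     continue
--
--     return arr
-- ===== SOURCE B (Python) =====
-- # Single linear pass: buffer each '#'-bounded segment, count its 'O's, and emit
-- # O's into the earliest '.'/'O' slots of the segment (other entries kept in place).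
-- def _emit(res, seg, o):
--     for c in seg:
--         if c == '.' or c == 'O':
--             if o > 0:
--                 res.append('O')
--                 o -= 1
--             else:
--                 res.append('.')
--         else:
--             res.append(c)
--
-- def move_rocks_for_line(arr):
--     res = []
--     seg = []
--     o = 0
--     for c in arr:
--         if c == '#':
--             _emit(res, seg, o)
--             res.append('#')
--             seg = []
--             o = 0
--         else:
--             seg.append(c)
--             if c == 'O':
--                 o += 1
--     _emit(res, seg, o)
--     return res
-- ===== Notes on version B (the rewrite author's own statement) =====
-- stated objective: alternative
-- what changed: Replaces A's in-place per-dot forward scan-and-swap with a single left-to-right pass that buffers each '#'-bounded segment, counts its 'O's, and emits them into the earliest '.'/'O' slots of a freshly built list.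
import Mathlib
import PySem

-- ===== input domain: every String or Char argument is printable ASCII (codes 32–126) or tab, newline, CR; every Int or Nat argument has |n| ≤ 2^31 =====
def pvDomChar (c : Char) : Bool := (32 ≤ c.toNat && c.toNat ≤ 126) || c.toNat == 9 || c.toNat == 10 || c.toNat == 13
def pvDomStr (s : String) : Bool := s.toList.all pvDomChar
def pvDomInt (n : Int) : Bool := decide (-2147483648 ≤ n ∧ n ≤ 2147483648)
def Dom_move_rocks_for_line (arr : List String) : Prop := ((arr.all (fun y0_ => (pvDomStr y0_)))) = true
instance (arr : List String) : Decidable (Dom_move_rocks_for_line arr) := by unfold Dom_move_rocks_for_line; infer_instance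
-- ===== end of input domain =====

-- B rewrites A's in-place per-dot forward scan-and-swap as a single left-to-right pass that
-- buffers each '#'-bounded segment, counts its 'O's and emits them into the earliest '.'/'O'
-- slots; A mutates its argument in place and returns it, B builds a fresh list — the
-- equivalence proved here is about the return value only.

-- ===== PORT A =====
-- inner `for j in range(i+1, len(arr))` loop of A (break / continue as returns / recursion)
def innerLoop (arr : List String) (i j : Nat) : List String :=
  if _h : j < arr.length then
    if arr.getD j "" = "O" then
      (arr.set j (arr.getD i "")).set i (arr.getD j "")
    else if arr.getD j "" = "#" then arr
    else innerLoop arr i (j + 1)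
  else arr
termination_by arr.length - j

-- outer `for i in range(len(arr))` loop of A (n = len(arr), evaluated once)
def outerLoop (arr : List String) (i n : Nat) : List String :=
  if i < n then
    outerLoop (if arr.getD i "" = "." then innerLoop arr i (i + 1) else arr) (i + 1) n
  else arr
termination_by n - i

def move_rocks_for_line (arr : List String) : List String :=
  outerLoop arr 0 arr.length

-- ===== PORT B =====
-- _emit of Source B: append the packed segment (o pending 'O's go into the '.'/'O' slots) to res
def emitB (res : List String) (seg : List String) (o : Nat) : List String :=
  match seg with
  | [] => res
  | c :: t =>
    if c = "." ∨ c = "O" then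
      if 0 < o then emitB (res ++ ["O"]) t (o - 1) else emitB (res ++ ["."]) t o
    else emitB (res ++ [c]) t o

def move_rocks_for_line_alt (arr : List String) : List String :=
  let st := arr.foldl
    (fun (st : List String × List String × Nat) c =>
      if c = "#" then (emitB st.1 st.2.1 st.2.2 ++ ["#"], ([], 0))
      else (st.1, (st.2.1 ++ [c], if c = "O" then st.2.2 + 1 else st.2.2)))
    ([], ([], 0))
  emitB st.1 st.2.1 st.2.2

-- ===== PRECONDITION & SPEC =====
def Spec_move_rocks_for_line (arr : List String) (out : List String) : Prop := out = move_rocks_for_line_alt arr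
instance (arr : List String) (out : List String) : Decidable (Spec_move_rocks_for_line arr out) := by unfold Spec_move_rocks_for_line; infer_instance

-- ===== CLAIM (what is proved, stated in full; the proofs are below) =====
def Claim_equal_move_rocks_for_line : Prop := ∀ (arr : List String), Dom_move_rocks_for_line arr → Spec_move_rocks_for_line arr (move_rocks_for_line arr)

-- ===== LEMMAS AND PROOFS =====

-- Reference function both ports are proved equal to: pack each '#'-bounded segment.
def packSeg (o : Nat) : List String → List String
  | [] => []
  | c :: t =>
    if c = "." ∨ c = "O" then
      if 0 < o then "O" :: packSeg (o - 1) t else "." :: packSeg o t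
    else c :: packSeg o t

def pack : List String → List String
  | [] => []
  | c :: t =>
    if c = "#" then "#" :: pack t
    else
      packSeg ((c :: t.takeWhile (· ≠ "#")).count "O") (c :: t.takeWhile (· ≠ "#")) ++
        pack (t.dropWhile (· ≠ "#"))
termination_by arr => arr.length
decreasing_by
  · simp
  · have h1 := List.length_dropWhile_le (p := (· ≠ "#")) (l := t)
    simp at h1 ⊢
    omega

-- first 'O' before the first '#', replaced by x (models A's inner scan-and-swap)
def pullx (x : String) : List String → Option (List String)
  | [] => none
  | c :: t =>
    if c = "O" then some (x :: t)
    else if c = "#" then none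
    else (pullx x t).map (c :: ·)

theorem pack_eq_general (t : List String) :
    pack t = packSeg ((t.takeWhile (· ≠ "#")).count "O") (t.takeWhile (· ≠ "#")) ++
      pack (t.dropWhile (· ≠ "#")) := by
  match t with
  | [] => simp [pack, packSeg]
  | c :: t2 =>
    by_cases hc : c = "#"
    · subst hc
      simp [pack, packSeg, List.takeWhile, List.dropWhile]
    · rw [pack]
      simp [hc]

theorem pack_seg_split (seg : List String) (t : List String)
    (h : ∀ y ∈ seg, y ≠ "#") :
    pack (seg ++ "#" :: t) = packSeg (seg.count "O") seg ++ "#" :: pack t := by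
  have hp : ∀ y ∈ seg, (fun x => decide (x ≠ "#")) y = true := by
    intro y hy; simpa using h y hy
  rw [pack_eq_general, List.takeWhile_append_of_pos hp, List.dropWhile_append]
  have hnil : List.dropWhile (fun x => decide (x ≠ "#")) seg = [] :=
    List.dropWhile_eq_nil_iff.mpr (by intro x hx; simpa using h x hx)
  rw [hnil]
  simp [pack, List.takeWhile, List.dropWhile]

theorem pack_nohash (seg : List String) (h : ∀ y ∈ seg, y ≠ "#") :
    pack seg = packSeg (seg.count "O") seg := by
  have : seg ++ ([] : List String) = seg := by simp
  rw [pack_eq_general]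
  have h1 : List.takeWhile (fun x => decide (x ≠ "#")) seg = seg :=
    List.takeWhile_eq_self_iff.mpr (by intro x hx; simpa using h x hx)
  have h2 : List.dropWhile (fun x => decide (x ≠ "#")) seg = [] :=
    List.dropWhile_eq_nil_iff.mpr (by intro x hx; simpa using h x hx)
  rw [h1, h2]
  simp [pack]

theorem packSeg_swap (u : List String) : ∀ o w, packSeg o (u ++ "O" :: w) = packSeg o (u ++ "." :: w) := by
  induction u with
  | nil => intro o w; simp [packSeg]
  | cons c t ih =>
    intro o w
    simp only [List.cons_append, packSeg]
    split
    · split <;> rw [ih]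
    · rw [ih]

theorem pullx_some (t : List String) : ∀ t', pullx "." t = some t' →
    ∃ u v, t = u ++ "O" :: v ∧ t' = u ++ "." :: v ∧ ∀ y ∈ u, y ≠ "O" ∧ y ≠ "#" := by
  induction t with
  | nil => intro t' h; simp [pullx] at h
  | cons c t ih =>
    intro t' h
    simp only [pullx] at h
    by_cases hO : c = "O"
    · subst hO
      simp at h
      exact ⟨[], t, by simp, by simp [← h], by simp⟩
    · by_cases hH : c = "#"
      · simp [hO, hH] at h
      · simp [hO, hH, Option.map_eq_some_iff] at h
        obtain ⟨t2', h2, rfl⟩ := h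
        obtain ⟨u, v, rfl, rfl, hu⟩ := ih t2' h2
        exact ⟨c :: u, v, by simp, by simp, by
          intro y hy
          rcases List.mem_cons.mp hy with rfl | hy2
          · exact ⟨hO, hH⟩
          · exact hu y hy2⟩

theorem pullx_none (t : List String) : pullx "." t = none →
    ∀ y ∈ t.takeWhile (· ≠ "#"), y ≠ "O" := by
  induction t with
  | nil => intro _ y hy; simp at hy
  | cons c t ih =>
    intro h y hy
    simp only [pullx] at h
    by_cases hO : c = "O"
    · simp [hO] at h
    · by_cases hH : c = "#"
      · subst hH; simp [List.takeWhile_cons] at hy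
      · simp [hO, hH] at h
        have hc : decide (c ≠ "#") = true := by simpa using hH
        simp only [List.takeWhile_cons, hc, if_true, List.mem_cons] at hy
        rcases hy with rfl | hy2
        · exact hO
        · exact ih h y hy2

theorem pullx_length (t : List String) : ∀ t' x, pullx x t = some t' → t'.length = t.length := by
  induction t with
  | nil => intro t' x h; simp [pullx] at h
  | cons c t ih =>
    intro t' x h
    simp only [pullx] at h
    by_cases hO : c = "O"
    · simp [hO] at h; simp [← h]
    · by_cases hH : c = "#"
      · simp [hO, hH] at h
      · simp [hO, hH, Option.map_eq_some_iff] at h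
        obtain ⟨t2', h2, rfl⟩ := h
        simp [ih t2' x h2]

theorem pack_cons_ne_dot (c : String) (t : List String) (h : c ≠ ".") :
    pack (c :: t) = c :: pack t := by
  by_cases hH : c = "#"
  · subst hH; rw [pack]; simp
  · rw [pack]
    simp only [hH, if_false]
    rw [pack_eq_general t]
    by_cases hO : c = "O"
    · subst hO
      simp [packSeg, List.count_cons]
    · simp [packSeg, List.count_cons, hO, h]

theorem pack_dot (t : List String) :
    pack ("." :: t) = match pullx "." t with
      | some t' => "O" :: pack t'
      | none => "." :: pack t := by
  cases hp : pullx "." t with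
  | none =>
    have hno := pullx_none t hp
    rw [pack]
    simp only [reduceIte, String.reduceEq]
    rw [pack_eq_general t]
    have hcount : (List.takeWhile (fun x => decide (x ≠ "#")) t).count "O" = 0 := by
      rw [List.count_eq_zero]
      intro hmem
      exact (hno "O" (by simpa using hmem)) rfl
    have hc2 : (("." : String) :: List.takeWhile (fun x => decide (x ≠ "#")) t).count "O" = 0 := by
      rw [List.count_cons, hcount]
      simp
    rw [hc2, hcount, packSeg]
    simp
  | some t' =>
    obtain ⟨u, v, rfl, rfl, hu⟩ := pullx_some t t' hp
    simp only
    have hpu : ∀ y ∈ u, (fun x => decide (x ≠ "#")) y = true := by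
      intro y hy; simpa using (hu y hy).2
    have hcu : u.count "O" = 0 := by
      rw [List.count_eq_zero]; intro hmem; exact (hu "O" hmem).1 rfl
    rw [pack]
    simp only [String.reduceEq, if_false]
    -- takeWhile/dropWhile of u ++ "O" :: v  and of u ++ "." :: v
    have htwO : List.takeWhile (fun x => decide (x ≠ "#")) (u ++ "O" :: v)
        = u ++ "O" :: List.takeWhile (fun x => decide (x ≠ "#")) v := by
      rw [List.takeWhile_append_of_pos hpu]; simp [List.takeWhile_cons]
    have htwD : List.takeWhile (fun x => decide (x ≠ "#")) (u ++ "." :: v)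
        = u ++ "." :: List.takeWhile (fun x => decide (x ≠ "#")) v := by
      rw [List.takeWhile_append_of_pos hpu]; simp [List.takeWhile_cons]
    have hdnil : List.dropWhile (fun x => decide (x ≠ "#")) u = [] :=
      List.dropWhile_eq_nil_iff.mpr (by intro x hx; simpa using (hu x hx).2)
    have hdwO : List.dropWhile (fun x => decide (x ≠ "#")) (u ++ "O" :: v)
        = List.dropWhile (fun x => decide (x ≠ "#")) v := by
      rw [List.dropWhile_append, hdnil]; simp [List.dropWhile_cons]
    have hdwD : List.dropWhile (fun x => decide (x ≠ "#")) (u ++ "." :: v)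
        = List.dropWhile (fun x => decide (x ≠ "#")) v := by
      rw [List.dropWhile_append, hdnil]; simp [List.dropWhile_cons]
    rw [htwO]
    rw [pack_eq_general (u ++ "." :: v), htwD, hdwO, hdwD]
    set k := (List.takeWhile (fun x => decide (x ≠ "#")) v).count "O" with hk
    have hcnt1 : (("." : String) :: (u ++ "O" :: List.takeWhile (fun x => decide (x ≠ "#")) v)).count "O" = k + 1 := by
      simp [List.count_cons, List.count_append, hcu, hk]
    have hcnt2 : ((u ++ "." :: List.takeWhile (fun x => decide (x ≠ "#")) v)).count "O" = k := by
      simp [List.count_cons, List.count_append, hcu, hk]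
    rw [hcnt1, hcnt2]
    have hps : packSeg (k + 1) (("." : String) :: (u ++ "O" :: List.takeWhile (fun x => decide (x ≠ "#")) v))
        = "O" :: packSeg k (u ++ "." :: List.takeWhile (fun x => decide (x ≠ "#")) v) := by
      rw [packSeg]
      simp only [String.reduceEq, or_false, if_true, Nat.succ_sub_one, Nat.zero_lt_succ]
      rw [packSeg_swap]
    rw [hps]
    simp

theorem getD_append_length (u : List String) (c : String) (t : List String) (d : String) :
    (u ++ c :: t).getD u.length d = c := by
  rw [List.getD_eq_getElem?_getD, List.getElem?_append_right (Nat.le_refl _)]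
  simp

theorem set_append_length (u : List String) (c x : String) (t : List String) :
    (u ++ c :: t).set u.length x = u ++ x :: t := by
  rw [List.set_append_right _ _ (Nat.le_refl _)]
  simp

theorem inner_go (t : List String) : ∀ (u : List String) (x : String),
    (∀ y ∈ u, y ≠ "O" ∧ y ≠ "#") →
    innerLoop (x :: (u ++ t)) 0 (u.length + 1) =
      match pullx x t with
      | some t' => "O" :: (u ++ t')
      | none => x :: (u ++ t) := by
  induction t with
  | nil =>
    intro u x _
    rw [innerLoop]
    simp [pullx]
  | cons c t2 ih =>
    intro u x hu
    rw [innerLoop]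
    have hlen : u.length + 1 < (x :: (u ++ c :: t2)).length := by
      simp only [List.length_cons, List.length_append]; omega
    rw [dif_pos hlen]
    have hget : (x :: (u ++ c :: t2)).getD (u.length + 1) "" = c := by
      rw [List.getD_cons_succ, getD_append_length]
    rw [hget]
    by_cases hO : c = "O"
    · subst hO
      rw [if_pos rfl]
      have hset1 : (x :: (u ++ "O" :: t2)).set (u.length + 1) ((x :: (u ++ "O" :: t2)).getD 0 "") = x :: (u ++ x :: t2) := by
        rw [List.set_cons_succ, set_append_length]
        rfl
      rw [hset1]
      simp [pullx, List.set]
    · rw [if_neg hO]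
      by_cases hH : c = "#"
      · subst hH
        rw [if_pos rfl]
        simp [pullx]
      · rw [if_neg hH]
        have hres : x :: (u ++ c :: t2) = x :: ((u ++ [c]) ++ t2) := by simp
        have hj : u.length + 1 + 1 = (u ++ [c]).length + 1 := by simp
        rw [hres, hj, ih (u ++ [c]) x ?hu2]
        case hu2 =>
          intro y hy
          rcases List.mem_append.mp hy with h1 | h2
          · exact hu y h1
          · simp at h2; subst h2; exact ⟨hO, hH⟩
        simp only [pullx, if_neg hO, if_neg hH]
        cases hp : pullx x t2 with
        | none => simp
        | some t2' => simp

theorem inner_shift_fuel (fuel : Nat) : ∀ (arr : List String) (i j : Nat) (x : String),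
    arr.length - j ≤ fuel →
    innerLoop (x :: arr) (i + 1) (j + 1) = x :: innerLoop arr i j := by
  induction fuel with
  | zero =>
    intro arr i j x hf
    conv_lhs => rw [innerLoop]
    conv_rhs => rw [innerLoop]
    rw [dif_neg (by simp only [List.length_cons]; omega), dif_neg (by omega)]
  | succ m ih =>
    intro arr i j x hf
    by_cases h : j < arr.length
    · conv_lhs => rw [innerLoop]
      conv_rhs => rw [innerLoop]
      rw [dif_pos (by simp only [List.length_cons]; omega), dif_pos h]
      simp only [List.getD_cons_succ]
      by_cases hO : arr.getD j "" = "O"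
      · rw [if_pos hO, if_pos hO, List.set_cons_succ, List.set_cons_succ]
      · rw [if_neg hO, if_neg hO]
        by_cases hH : arr.getD j "" = "#"
        · rw [if_pos hH, if_pos hH]
        · rw [if_neg hH, if_neg hH]
          exact ih arr i (j + 1) x (by omega)
    · conv_lhs => rw [innerLoop]
      conv_rhs => rw [innerLoop]
      rw [dif_neg (by simp only [List.length_cons]; omega), dif_neg h]

theorem inner_shift (arr : List String) (i j : Nat) (x : String) :
    innerLoop (x :: arr) (i + 1) (j + 1) = x :: innerLoop arr i j :=
  inner_shift_fuel arr.length arr i j x (by omega)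

theorem outer_shift_fuel (fuel : Nat) : ∀ (arr : List String) (i n : Nat) (x : String),
    n - i ≤ fuel →
    outerLoop (x :: arr) (i + 1) (n + 1) = x :: outerLoop arr i n := by
  induction fuel with
  | zero =>
    intro arr i n x hf
    conv_lhs => rw [outerLoop]
    conv_rhs => rw [outerLoop]
    rw [if_neg (by omega), if_neg (by omega)]
  | succ m ih =>
    intro arr i n x hf
    by_cases h : i < n
    · conv_lhs => rw [outerLoop]
      conv_rhs => rw [outerLoop]
      rw [if_pos (by omega), if_pos h]
      simp only [List.getD_cons_succ]
      by_cases hc : arr.getD i "" = "."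
      · rw [if_pos hc, if_pos hc, inner_shift]
        exact ih _ (i + 1) n x (by omega)
      · rw [if_neg hc, if_neg hc]
        exact ih _ (i + 1) n x (by omega)
    · conv_lhs => rw [outerLoop]
      conv_rhs => rw [outerLoop]
      rw [if_neg (by omega), if_neg h]

theorem outer_shift (arr : List String) (i n : Nat) (x : String) :
    outerLoop (x :: arr) (i + 1) (n + 1) = x :: outerLoop arr i n :=
  outer_shift_fuel n arr i n x (by omega)

theorem mainA : ∀ (n : Nat) (arr : List String), arr.length = n → outerLoop arr 0 n = pack arr := by
  intro n
  induction n using Nat.strong_induction_on with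
  | _ n ih =>
    intro arr hlen
    match arr with
    | [] =>
      rw [outerLoop]
      simp at hlen
      rw [if_neg (by omega)]
      simp [pack]
    | c :: t =>
      simp only [List.length_cons] at hlen
      conv_lhs => rw [outerLoop]
      rw [if_pos (by omega)]
      simp only [List.getD_cons_zero]
      by_cases hc : c = "."
      · subst hc
        rw [if_pos rfl]
        have hin : innerLoop ("." :: t) 0 (0 + 1) =
            match pullx "." t with
            | some t' => "O" :: ([] ++ t')
            | none => "." :: ([] ++ t) := by
          have := inner_go t [] "." (by simp)
          simpa using this
        cases hp : pullx "." t with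
        | some t' =>
          rw [hp] at hin
          simp only [List.nil_append] at hin
          rw [hin]
          have hn : n = t.length + 1 := by omega
          subst hn
          rw [show (0 + 1 = 0 + 1) from rfl, outer_shift t' 0 t.length "O"]
          rw [ih t.length (by omega) t' (pullx_length t t' "." hp)]
          rw [pack_dot, hp]
        | none =>
          rw [hp] at hin
          simp only [List.nil_append] at hin
          rw [hin]
          have hn : n = t.length + 1 := by omega
          subst hn
          rw [outer_shift t 0 t.length "."]
          rw [ih t.length (by omega) t rfl]
          rw [pack_dot, hp]
      · rw [if_neg hc]
        have hn : n = t.length + 1 := by omega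
        subst hn
        rw [outer_shift t 0 t.length c]
        rw [ih t.length (by omega) t rfl]
        rw [pack_cons_ne_dot c t hc]

theorem emitB_eq (seg : List String) : ∀ res o, emitB res seg o = res ++ packSeg o seg := by
  induction seg with
  | nil => intro res o; simp [emitB, packSeg]
  | cons c t ih =>
    intro res o
    simp only [emitB, packSeg]
    split
    · split <;> rw [ih] <;> simp
    · rw [ih]; simp

theorem mainB_loop (arr : List String) : ∀ (res seg : List String) (o : Nat),
    o = seg.count "O" → (∀ y ∈ seg, y ≠ "#") →
    (let st := arr.foldl
      (fun (st : List String × List String × Nat) c =>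
        if c = "#" then (emitB st.1 st.2.1 st.2.2 ++ ["#"], ([], 0))
        else (st.1, (st.2.1 ++ [c], if c = "O" then st.2.2 + 1 else st.2.2)))
      (res, (seg, o))
     emitB st.1 st.2.1 st.2.2) = res ++ pack (seg ++ arr) := by
  induction arr with
  | nil =>
    intro res seg o ho hseg
    simp only [List.foldl_nil, List.append_nil]
    rw [emitB_eq, ho, pack_nohash seg hseg]
  | cons c t ih =>
    intro res seg o ho hseg
    simp only [List.foldl_cons]
    by_cases hc : c = "#"
    · subst hc
      rw [if_pos rfl]
      have := ih (emitB res seg o ++ ["#"]) [] 0 (by simp) (by simp)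
      simp only at this ⊢
      rw [this]
      rw [emitB_eq, ho, pack_seg_split seg t hseg]
      simp
    · rw [if_neg hc]
      have hcount : (if c = "O" then o + 1 else o) = (seg ++ [c]).count "O" := by
        rw [List.count_append, ho]
        by_cases hO : c = "O"
        · subst hO; simp
        · rw [if_neg hO]
          simp [List.count_singleton]
          omega
      have hseg2 : ∀ y ∈ seg ++ [c], y ≠ "#" := by
        intro y hy
        rcases List.mem_append.mp hy with h1 | h2
        · exact hseg y h1
        · simp at h2; subst h2; exact hc
      have := ih res (seg ++ [c]) _ hcount hseg2
      simp only at this ⊢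
      rw [this]
      simp

-- ===== VERDICT (by name: the statement is the Claim_ definition above) =====
theorem move_rocks_for_line_spec : Claim_equal_move_rocks_for_line := by
  intro arr _
  unfold Spec_move_rocks_for_line move_rocks_for_line move_rocks_for_line_alt
  rw [mainA arr.length arr rfl]
  have := mainB_loop arr [] [] 0 (by simp) (by simp)
  simpa using this.symm
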